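-- pv_equiv track=rewrite | github.com/pythonianfr/rework | testutils.py | scrub
-- ===== SOURCE A (Python) =====
-- def scrub(anstr, subst='X'):
--     out = []
--     digit = False
--     for char in anstr:
--         if char.isdigit():
--             if not digit:
--                 digit = True
--         else:
--             if digit:
--                 digit = False
--                 out.append('<{}>'.format(subst))
--             out.append(char)
--     # trailing digits ...
--     if digit:
--         out.append('<{}>'.format(subst))
--     return ''.join(out).strip()
-- ===== SOURCE B (Python) =====
-- def scrub(anstr, subst='X'):
--     # run-based scan: one piece per maximal run of digits / non-digits
--     token = '<{}>'.format(subst)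
--     pieces = []
--     i = 0
--     n = len(anstr)
--     while i < n:
--         d = anstr[i].isdigit()
--         j = i + 1
--         while j < n and anstr[j].isdigit() == d:
--             j += 1
--         pieces.append(token if d else anstr[i:j])
--         i = j
--     return ''.join(pieces).strip()
-- ===== Notes on version B (the rewrite author's own statement) =====
-- stated objective: alternative
-- what changed: Replaces A's char-by-char digit-flag state machine with a run-splitting scan that finds each maximal digit/non-digit run and emits one piece (token or the run slice) per run.
import Mathlib
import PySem

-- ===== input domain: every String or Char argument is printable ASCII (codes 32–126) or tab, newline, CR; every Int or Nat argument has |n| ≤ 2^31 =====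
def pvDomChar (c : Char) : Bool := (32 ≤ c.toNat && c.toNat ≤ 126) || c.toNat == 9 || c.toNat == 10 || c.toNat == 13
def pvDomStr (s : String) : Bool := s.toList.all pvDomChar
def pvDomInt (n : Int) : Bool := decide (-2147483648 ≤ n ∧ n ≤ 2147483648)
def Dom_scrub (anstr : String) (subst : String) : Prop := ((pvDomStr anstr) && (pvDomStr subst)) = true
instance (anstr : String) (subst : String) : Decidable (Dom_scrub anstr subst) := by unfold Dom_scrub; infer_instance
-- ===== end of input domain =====

-- B replaces A's digit-flag state machine with a maximal-run scanner; alternative decomposition, same cost.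

-- ===== PORT A =====
-- A's for-loop: fold over the characters with state (out, digit-flag); then trailing token, join, strip.
def scrubStep (token : List Char) (st : List (List Char) × Bool) (c : Char) : List (List Char) × Bool :=
  if PySem.Chars.isdigit c then
    (if st.2 = false then (st.1, true) else st)
  else
    let st' := if st.2 then (st.1 ++ [token], false) else st
    (st'.1 ++ [[c]], st'.2)

def scrub (anstr : String) (subst : String) : String :=
  String.mk (PySem.Chars.strip (PySem.Chars.join []
    (if (anstr.toList.foldl (scrubStep ('<' :: subst.toList ++ ['>'])) ([], false)).2
     then (anstr.toList.foldl (scrubStep ('<' :: subst.toList ++ ['>'])) ([], false)).1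
            ++ ['<' :: subst.toList ++ ['>']]
     else (anstr.toList.foldl (scrubStep ('<' :: subst.toList ++ ['>'])) ([], false)).1)))

-- ===== PORT B =====
-- inner while loop of B: split off the longest prefix whose chars have isdigit = d
def spanDigits (d : Bool) : List Char → List Char × List Char
  | [] => ([], [])
  | c :: cs =>
    if PySem.Chars.isdigit c == d then
      let p := spanDigits d cs
      (c :: p.1, p.2)
    else ([], c :: cs)

theorem spanDigits_snd_length (d : Bool) (l : List Char) : (spanDigits d l).2.length ≤ l.length := by
  induction l with
  | nil => simp [spanDigits]
  | cons c cs ih =>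
    simp only [spanDigits]
    split
    · simpa using Nat.le_succ_of_le ih
    · simp

-- outer while loop of B: one piece per maximal run
def piecesB (token : List Char) : List Char → List (List Char)
  | [] => []
  | c :: rest =>
    let d := PySem.Chars.isdigit c
    let p := spanDigits d rest
    (if d then token else c :: p.1) :: piecesB token p.2
termination_by l => l.length
decreasing_by
  simpa using Nat.lt_succ_of_le (spanDigits_snd_length _ _)

def scrub_alt (anstr : String) (subst : String) : String :=
  String.mk (PySem.Chars.strip (PySem.Chars.join []
    (piecesB ('<' :: subst.toList ++ ['>']) anstr.toList)))

-- ===== PRECONDITION & SPEC =====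
def Spec_scrub (anstr : String) (subst : String) (out : String) : Prop := out = scrub_alt anstr subst
instance (anstr : String) (subst : String) (out : String) : Decidable (Spec_scrub anstr subst out) := by unfold Spec_scrub; infer_instance

-- ===== CLAIM (what is proved, stated in full; the proofs are below) =====
def Claim_equal_scrub : Prop := ∀ (anstr : String) (subst : String), Dom_scrub anstr subst → Spec_scrub anstr subst (scrub anstr subst)

-- ===== LEMMAS AND PROOFS =====

theorem join_nil_cons (x : List Char) (xs : List (List Char)) :
    PySem.Chars.join [] (x :: xs) = x ++ PySem.Chars.join [] xs := by
  cases xs with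
  | nil => simp [PySem.Chars.join_singleton, PySem.Chars.join_nil]
  | cons y t => rw [PySem.Chars.join_cons_cons]; simp

theorem join_nil_append (a b : List (List Char)) :
    PySem.Chars.join [] (a ++ b) = PySem.Chars.join [] a ++ PySem.Chars.join [] b := by
  induction a with
  | nil => simp [PySem.Chars.join_nil]
  | cons x t ih => simp [join_nil_cons, ih]

-- reference form of A's loop result (flattened output for initial flag `digit`)
def gA (token : List Char) (digit : Bool) : List Char → List Char
  | [] => if digit then token else []
  | c :: cs =>
    if PySem.Chars.isdigit c then gA token true cs
    else (if digit then token else []) ++ c :: gA token false cs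

theorem foldl_scrubStep (token : List Char) (cs : List Char) :
    ∀ (out : List (List Char)) (digit : Bool),
      (PySem.Chars.join []
        (if (cs.foldl (scrubStep token) (out, digit)).2
          then (cs.foldl (scrubStep token) (out, digit)).1 ++ [token]
          else (cs.foldl (scrubStep token) (out, digit)).1))
      = PySem.Chars.join [] out ++ gA token digit cs := by
  induction cs with
  | nil =>
    intro out digit
    cases digit <;> simp [gA, join_nil_append, PySem.Chars.join_singleton]
  | cons c cs ih =>
    intro out digit
    by_cases hd : PySem.Chars.isdigit c
    · cases digit <;>
        simp [List.foldl_cons, scrubStep, hd, ih, gA]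
    · cases digit <;>
        simp [List.foldl_cons, scrubStep, hd, ih, gA, join_nil_append, join_nil_cons,
          PySem.Chars.join_singleton, List.append_assoc]

theorem spanDigits_spec (d : Bool) (l : List Char) :
    l = (spanDigits d l).1 ++ (spanDigits d l).2 ∧
    (∀ x ∈ (spanDigits d l).1, PySem.Chars.isdigit x = d) ∧
    (∀ c cs, (spanDigits d l).2 = c :: cs → PySem.Chars.isdigit c ≠ d) := by
  induction l with
  | nil => simp [spanDigits]
  | cons c cs ih =>
    by_cases h : PySem.Chars.isdigit c == d
    · simp only [spanDigits, h, if_pos]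
      refine ⟨by simpa using ih.1, ?_, ih.2.2⟩
      intro x hx
      rcases List.mem_cons.mp hx with rfl | hx
      · exact eq_of_beq h
      · exact ih.2.1 x hx
    · simp only [spanDigits, h]
      exact ⟨by simp, by simp, by
        intro c' cs' hcc
        simp at h
        injection hcc with h1 _
        subst h1; exact h⟩

theorem gA_true_digits (token : List Char) (grp : List Char)
    (h : ∀ x ∈ grp, PySem.Chars.isdigit x = true) (rest : List Char) :
    gA token true (grp ++ rest) = gA token true rest := by
  induction grp with
  | nil => rfl
  | cons x t ih =>
    have hx := h x (by simp)
    simp only [List.cons_append, gA, hx, if_pos]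
    exact ih (fun y hy => h y (by simp [hy]))

theorem gA_false_nondigits (token : List Char) (grp : List Char)
    (h : ∀ x ∈ grp, PySem.Chars.isdigit x = false) (rest : List Char) :
    gA token false (grp ++ rest) = grp ++ gA token false rest := by
  induction grp with
  | nil => rfl
  | cons x t ih =>
    have hx := h x (by simp)
    simp only [List.cons_append, gA, hx]
    simp [ih (fun y hy => h y (by simp [hy]))]

theorem gA_true_boundary (token : List Char) (rest : List Char)
    (h : ∀ c cs, rest = c :: cs → PySem.Chars.isdigit c ≠ true) :
    gA token true rest = token ++ gA token false rest := by
  cases rest with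
  | nil => simp [gA]
  | cons c cs =>
    have hc : PySem.Chars.isdigit c = false := by
      have := h c cs rfl; simpa using this
    simp [gA, hc]

theorem gA_eq_join_piecesB (token : List Char) :
    ∀ (l : List Char), gA token false l = PySem.Chars.join [] (piecesB token l) := by
  intro l
  induction hn : l.length using Nat.strong_induction_on generalizing l with
  | _ n ih =>
    cases l with
    | nil => simp [gA, piecesB, PySem.Chars.join_nil]
    | cons c rest =>
      subst hn
      rcases hE : spanDigits (PySem.Chars.isdigit c) rest with ⟨grp, rest2⟩
      have hspec := spanDigits_spec (PySem.Chars.isdigit c) rest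
      rw [hE] at hspec
      obtain ⟨hsplit, hall, hbound⟩ := hspec
      have hlen : rest2.length < (c :: rest).length := by
        have := spanDigits_snd_length (PySem.Chars.isdigit c) rest
        rw [hE] at this
        exact Nat.lt_succ_of_le this
      have ihr := ih _ hlen rest2 rfl
      have hRHS : PySem.Chars.join [] (piecesB token (c :: rest))
          = (if PySem.Chars.isdigit c then token else c :: grp)
              ++ PySem.Chars.join [] (piecesB token rest2) := by
        simp [piecesB, hE, join_nil_cons]
      rw [hRHS]
      by_cases hd : PySem.Chars.isdigit c
      · have h1 : gA token false (c :: rest) = gA token true rest := by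
          simp [gA, hd]
        rw [h1]
        conv_lhs => rw [hsplit]
        rw [gA_true_digits token _ (by intro x hx; rw [hall x hx, hd]) _]
        rw [gA_true_boundary token _ (by
          intro c' cs' hcc
          have h2 := hbound c' cs' hcc
          rw [hd] at h2
          exact h2)]
        rw [ihr]
        simp [hd]
      · have hdf : PySem.Chars.isdigit c = false := by simpa using hd
        have h1 : gA token false (c :: rest) = c :: gA token false rest := by
          simp [gA, hdf]
        rw [h1]
        conv_lhs => rw [hsplit]
        rw [gA_false_nondigits token _ (by intro x hx; rw [hall x hx, hdf]) _]
        rw [ihr]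
        simp [hdf]

-- ===== VERDICT (by name: the statement is the Claim_ definition above) =====
theorem scrub_spec : Claim_equal_scrub := by
  intro anstr subst _
  unfold Spec_scrub scrub scrub_alt
  have h := foldl_scrubStep ('<' :: subst.toList ++ ['>']) anstr.toList [] false
  simp only [PySem.Chars.join_nil, List.nil_append] at h
  rw [h, gA_eq_join_piecesB]
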